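-- pv_equiv track=rewrite | github.com/Horse64/core.horse64.org | tools/translator_syntaxhelpers.py | prevnonblankidx
-- ===== SOURCE A (Python) =====
-- def prevnonblankidx(t, idx, no=1):
--     while no > 0:
--         idx -= 1
--         while (idx >= 0 and
--                 t[idx].strip(" \r\n\t") == ""):
--             idx -= 1
--         no -= 1
--     if idx < 0:
--         return -1
--     return idx
-- ===== SOURCE B (Python) =====
-- def prevnonblankidx(t, idx, no=1):
--     if no <= 0:
--         return idx if idx >= 0 else -1
--     nb = [i for i in range(idx) if t[i].strip(" \r\n\t") != ""]
--     if no <= len(nb):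
--         return nb[-no]
--     return -1
-- ===== Notes on version B (the rewrite author's own statement) =====
-- stated objective: alternative
-- what changed: Replaces A's backward nested while-loops (outer loop over the count, inner loop skipping blanks) with a single forward comprehension collecting all non-blank token indices below idx and indexing it from the end with nb[-no].
import Mathlib
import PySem

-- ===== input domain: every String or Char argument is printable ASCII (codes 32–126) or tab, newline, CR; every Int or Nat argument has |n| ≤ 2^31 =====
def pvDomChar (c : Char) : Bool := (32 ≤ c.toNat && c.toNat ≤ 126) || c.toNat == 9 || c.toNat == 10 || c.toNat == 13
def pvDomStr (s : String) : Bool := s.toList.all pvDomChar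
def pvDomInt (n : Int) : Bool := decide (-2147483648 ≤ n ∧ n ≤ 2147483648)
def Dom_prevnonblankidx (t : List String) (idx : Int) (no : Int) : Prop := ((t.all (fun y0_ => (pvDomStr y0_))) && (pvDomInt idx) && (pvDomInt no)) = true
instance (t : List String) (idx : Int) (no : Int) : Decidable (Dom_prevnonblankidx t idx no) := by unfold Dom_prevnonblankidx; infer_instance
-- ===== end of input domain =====

-- B replaces A's backward nested while-loops by one forward collection of the
-- non-blank indices below idx, indexed from the end (alternative decomposition).

-- ===== PORT A =====
-- t[i].strip(" \r\n\t"); the list access is pyGetD (A only reads indices ≥ 0, and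
-- Pre_ keeps the start index within range, so the default is never used there)
def pvTokStrip (t : List String) (i : Int) : String :=
  PySem.Str.stripChars (PySem.List.pyGetD t i "") " \r\n\t"

-- inner while-loop: while idx >= 0 and t[idx].strip(" \r\n\t") == "": idx -= 1
def pvInnerA (t : List String) (idx : Int) : Int :=
  if h : 0 ≤ idx ∧ pvTokStrip t idx = "" then pvInnerA t (idx - 1)
  else idx
termination_by (idx + 1).toNat
decreasing_by omega

-- outer while-loop: while no > 0: idx -= 1; <inner>; no -= 1
def pvOuterA (t : List String) (idx no : Int) : Int :=
  if h : 0 < no then pvOuterA t (pvInnerA t (idx - 1)) (no - 1)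
  else idx
termination_by no.toNat
decreasing_by omega

def prevnonblankidx (t : List String) (idx : Int) (no : Int) : Int :=
  let r := pvOuterA t idx no
  if r < 0 then -1 else r

-- ===== PORT B =====
-- nb = [i for i in range(idx) if t[i].strip(" \r\n\t") != ""]
def pvNb (t : List String) (idx : Int) : List Int :=
  (PySem.List.pyRange 0 idx 1).filter (fun i => pvTokStrip t i ≠ "")

def prevnonblankidx_alt (t : List String) (idx : Int) (no : Int) : Int :=
  if no ≤ 0 then (if 0 ≤ idx then idx else -1)
  else
    let nb := pvNb t idx
    if no ≤ (nb.length : Int) then PySem.List.pyGetD nb (-no) (-1) else -1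

-- ===== PRECONDITION & SPEC =====
-- Pre_ excludes exactly the inputs where Python A raises IndexError: a start index
-- past the end of the list while at least one step is taken (no > 0).
def Pre_prevnonblankidx (t : List String) (idx : Int) (no : Int) : Prop :=
  no ≤ 0 ∨ idx ≤ (t.length : Int)
instance (t : List String) (idx : Int) (no : Int) : Decidable (Pre_prevnonblankidx t idx no) := by
  unfold Pre_prevnonblankidx; infer_instance

def pvWitness_prevnonblankidx : List String × Int × Int := (["a", " ", "b"], 3, 1)

def Spec_prevnonblankidx (t : List String) (idx : Int) (no : Int) (out : Int) : Prop := out = prevnonblankidx_alt t idx no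
instance (t : List String) (idx : Int) (no : Int) (out : Int) : Decidable (Spec_prevnonblankidx t idx no out) := by unfold Spec_prevnonblankidx; infer_instance

-- ===== CLAIM (what is proved, stated in full; the proofs are below) =====
def Claim_equal_prevnonblankidx : Prop := ∀ (t : List String) (idx : Int) (no : Int), Dom_prevnonblankidx t idx no → Pre_prevnonblankidx t idx no → Spec_prevnonblankidx t idx no (prevnonblankidx t idx no)

-- ===== LEMMAS AND PROOFS =====

lemma pvInnerA_spec (t : List String) (idx : Int) :
    (pvNb t idx = [] ∧ pvInnerA t (idx - 1) < 0) ∨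
    (∃ j, pvInnerA t (idx - 1) = j ∧ 0 ≤ j ∧ pvNb t idx = pvNb t j ++ [j]) := by
  rcases (by omega : idx ≤ 0 ∨ 0 < idx) with h0 | h0
  · left
    refine ⟨by simp [pvNb, PySem.List.pyRange_one_eq_nil h0], ?_⟩
    rw [pvInnerA]
    rw [dif_neg (by omega)]
    omega
  · have hsplit : PySem.List.pyRange 0 idx 1 = PySem.List.pyRange 0 (idx - 1) 1 ++ [idx - 1] := by
      have := PySem.List.pyRange_one_succ_right (a := 0) (b := idx - 1) (by omega)
      simpa [show idx - 1 + 1 = idx by ring] using this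
    rw [pvInnerA]
    by_cases hb : pvTokStrip t (idx - 1) = ""
    · rw [dif_pos ⟨by omega, hb⟩]
      have hrec := pvInnerA_spec t (idx - 1)
      have hnb : pvNb t idx = pvNb t (idx - 1) := by
        simp [pvNb, hsplit, List.filter_append, hb]
      rw [hnb]
      exact hrec
    · rw [dif_neg (by tauto)]
      right
      exact ⟨idx - 1, rfl, by omega, by simp [pvNb, hsplit, List.filter_append, hb]⟩
termination_by idx.toNat
decreasing_by omega


lemma pvOuterA_neg (t : List String) (no j : Int) (hj : j < 0) : pvOuterA t j no < 0 := by
  rw [pvOuterA]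
  by_cases h : 0 < no
  · rw [dif_pos h]
    have hinner : pvInnerA t (j - 1) = j - 1 := by rw [pvInnerA, dif_neg (by omega)]
    rw [hinner]
    exact pvOuterA_neg t (no - 1) (j - 1) (by omega)
  · rw [dif_neg h]; exact hj
termination_by no.toNat
decreasing_by omega


lemma pvOuterA_spec (t : List String) (n : Nat) (idx : Int) :
    ((((n : Int) + 1) ≤ ((pvNb t idx).length : Int) ∧
      pvOuterA t idx ((n : Int) + 1) = PySem.List.pyGetD (pvNb t idx) (-((n : Int) + 1)) (-1) ∧
      0 ≤ pvOuterA t idx ((n : Int) + 1)) ∨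
     (((pvNb t idx).length : Int) < (n : Int) + 1 ∧ pvOuterA t idx ((n : Int) + 1) < 0)) := by
  induction n generalizing idx with
  | zero =>
    rw [pvOuterA, dif_pos (by omega)]
    rw [pvOuterA, dif_neg (by omega)]
    rcases pvInnerA_spec t idx with ⟨hnb, hlt⟩ | ⟨j, hj, hj0, hnb⟩
    · right
      refine ⟨by simp [hnb], by simpa using hlt⟩
    · left
      have hlen : (pvNb t idx).length = (pvNb t j).length + 1 := by simp [hnb]
      refine ⟨by omega, ?_, by rw [hj]; exact hj0⟩
      have hc : (-(((0 : Nat) : Int) + 1)) = -(((1 : Nat) : Int)) := by norm_num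
      rw [hj, hc, hnb]
      have h1 := PySem.List.pyGetD_neg_natCast (pvNb t j ++ [j]) 1 (-1) (by omega) (by simp)
      rw [h1]
      simp
  | succ n ih =>
    rw [pvOuterA, dif_pos (by push_cast; omega)]
    have harg : ((n : Nat) + 1 : Nat) + (1 : Int) - 1 = ((n : Int) + 1) := by push_cast; ring
    rcases pvInnerA_spec t idx with ⟨hnb, hlt⟩ | ⟨j, hj, hj0, hnb⟩
    · right
      constructor
      · simp [hnb]; omega
      · rw [harg]
        exact pvOuterA_neg t _ _ (by omega)
    · rw [hj, harg]
      have hlen : (pvNb t idx).length = (pvNb t j).length + 1 := by simp [hnb]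
      rcases ih j with ⟨hle, hval, hpos⟩ | ⟨hgt, hlt⟩
      · left
        have hlenj : (n + 1) ≤ (pvNb t j).length := by exact_mod_cast hle
        refine ⟨by push_cast; omega, ?_, hpos⟩
        have hcast2 : (-(((n : Nat) + 1 : Nat) + 1 : Int)) = -((n + 2 : Nat) : Int) := by push_cast; ring
        have hcast1 : (-((n : Int) + 1)) = -((n + 1 : Nat) : Int) := by push_cast; ring
        rw [hval, hcast2, hcast1, hnb]
        have h2 := PySem.List.pyGetD_neg_natCast (pvNb t j ++ [j]) (n + 2) (-1) (by omega) (by simp; omega)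
        have h1 := PySem.List.pyGetD_neg_natCast (pvNb t j) (n + 1) (-1) (by omega) hlenj
        rw [h2, h1]
        have hi : (pvNb t j ++ [j]).length - (n + 2) < (pvNb t j).length := by simp; omega
        rw [List.getElem_append_left hi]
        congr 1
        simp
      · right
        refine ⟨by push_cast at *; omega, hlt⟩

-- ===== VERDICT (by name: the statement is the Claim_ definition above) =====
theorem prevnonblankidx_spec : Claim_equal_prevnonblankidx := by
  intro t idx no _ hpre
  unfold Spec_prevnonblankidx prevnonblankidx prevnonblankidx_alt
  by_cases hno : no ≤ 0
  · have h0 : pvOuterA t idx no = idx := by rw [pvOuterA, dif_neg (by omega)]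
    show (if pvOuterA t idx no < 0 then -1 else pvOuterA t idx no) = _
    rw [h0, if_pos hno]
    split_ifs <;> omega
  · have hno' : no = (((no - 1).toNat : Int)) + 1 := by omega
    show (if pvOuterA t idx no < 0 then -1 else pvOuterA t idx no) = _
    rw [if_neg hno, hno']
    show (if pvOuterA t idx (((no - 1).toNat : Int) + 1) < 0 then -1 else pvOuterA t idx (((no - 1).toNat : Int) + 1)) =
      (if (((no - 1).toNat : Int) + 1) ≤ ((pvNb t idx).length : Int) then PySem.List.pyGetD (pvNb t idx) (-(((no - 1).toNat : Int) + 1)) (-1) else -1)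
    rcases pvOuterA_spec t (no - 1).toNat idx with ⟨hle, hval, hpos⟩ | ⟨hgt, hlt⟩
    · rw [if_neg (by omega), if_pos hle]
      exact hval
    · rw [if_pos hlt, if_neg (by omega)]
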